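-- pv_equiv track=rewrite | github.com/d3tk/REOrder | src/models/layers/hilbert.py | snake_diagonal_scan_order
-- ===== SOURCE A (Python) =====
-- def snake_diagonal_scan_order(grid_width, grid_height):
--     order = []
--     max_sum = (grid_width - 1) + (grid_height - 1)
--     for s in range(max_sum + 1):
--         x_min = max(0, s - (grid_height - 1))
--         x_max = min(s, grid_width - 1)
--         xs = list(range(x_min, x_max + 1))
--
--         if s % 2 == 1:
--             xs.reverse()
--
--         for x in xs:
--             y = s - x
--             order.append(y * grid_width + x)
--
--     return order
-- ===== SOURCE B (Python) =====
-- def snake_diagonal_scan_order(grid_width, grid_height):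
--     if grid_width <= 0 or grid_height <= 0:
--         return []
--     diagonals = [[] for _ in range(grid_width + grid_height - 1)]
--     for x in range(grid_width):
--         for y in range(grid_height):
--             diagonals[x + y].append(y * grid_width + x)
--     order = []
--     for s, bucket in enumerate(diagonals):
--         if s % 2 == 1:
--             bucket.reverse()
--         order.extend(bucket)
--     return order
-- ===== Notes on version B (the rewrite author's own statement) =====
-- stated objective: alternative
-- what changed: B builds per-diagonal buckets with a nested x/y loop over the grid and then emits the buckets in ascending diagonal order (reversing odd ones), instead of A's arithmetic derivation of per-diagonal x bounds; same O(W*H) cost, different decomposition.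
import Mathlib
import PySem

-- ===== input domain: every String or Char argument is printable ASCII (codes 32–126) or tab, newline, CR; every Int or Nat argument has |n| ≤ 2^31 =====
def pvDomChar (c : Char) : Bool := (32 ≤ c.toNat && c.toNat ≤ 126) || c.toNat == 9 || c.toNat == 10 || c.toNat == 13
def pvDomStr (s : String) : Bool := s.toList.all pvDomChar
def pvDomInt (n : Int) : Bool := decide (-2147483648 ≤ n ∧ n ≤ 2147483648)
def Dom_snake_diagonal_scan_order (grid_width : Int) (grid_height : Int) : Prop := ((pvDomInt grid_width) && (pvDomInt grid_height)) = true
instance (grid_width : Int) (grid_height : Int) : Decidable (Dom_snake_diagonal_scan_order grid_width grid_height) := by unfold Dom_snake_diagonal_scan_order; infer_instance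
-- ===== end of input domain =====

-- B groups the flat indices into per-diagonal buckets with a nested x/y loop and then emits
-- the buckets in order (reversing odd ones), instead of computing per-diagonal x bounds
-- arithmetically as A does; same output, alternative decomposition (no speed claim).

-- ===== PORT A =====
def snake_diagonal_scan_order (grid_width : Int) (grid_height : Int) : List Int :=
  let max_sum := (grid_width - 1) + (grid_height - 1)
  (PySem.List.pyRange 0 (max_sum + 1) 1).foldl (fun order s =>
    let x_min := max 0 (s - (grid_height - 1))
    let x_max := min s (grid_width - 1)
    let xs := PySem.List.pyRange x_min (x_max + 1) 1
    let xs := if PySem.Int.mod s 2 == 1 then xs.reverse else xs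
    xs.foldl (fun order x => order ++ [(s - x) * grid_width + x]) order) []

-- ===== PORT B =====
def snake_diagonal_scan_order_alt (grid_width : Int) (grid_height : Int) : List Int :=
  if grid_width ≤ 0 ∨ grid_height ≤ 0 then []
  else
    let diagonals : List (List Int) :=
      (PySem.List.pyRange 0 grid_width 1).foldl (fun d x =>
        (PySem.List.pyRange 0 grid_height 1).foldl (fun d y =>
          -- diagonals[x + y].append(y * grid_width + x): x, y ≥ 0 so .toNat is exact here
          d.modify (x + y).toNat (fun b => b ++ [y * grid_width + x])) d)
        (List.replicate (grid_width + grid_height - 1).toNat ([] : List Int))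
    (PySem.List.enumerate diagonals).foldl (fun order sb =>
      let bucket := if PySem.Int.mod sb.1 2 == 1 then sb.2.reverse else sb.2
      order ++ bucket) []

-- ===== PRECONDITION & SPEC =====
def Spec_snake_diagonal_scan_order (grid_width : Int) (grid_height : Int) (out : List Int) : Prop := out = snake_diagonal_scan_order_alt grid_width grid_height
instance (grid_width : Int) (grid_height : Int) (out : List Int) : Decidable (Spec_snake_diagonal_scan_order grid_width grid_height out) := by unfold Spec_snake_diagonal_scan_order; infer_instance

-- ===== CLAIM (what is proved, stated in full; the proofs are below) =====
def Claim_equal_snake_diagonal_scan_order : Prop := ∀ (grid_width : Int) (grid_height : Int), Dom_snake_diagonal_scan_order grid_width grid_height → Spec_snake_diagonal_scan_order grid_width grid_height (snake_diagonal_scan_order grid_width grid_height)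

-- ===== LEMMAS AND PROOFS =====

-- the x-range of diagonal s, and the flat index emitted for column x of diagonal s
def pvXs (w h s : Int) : List Int := PySem.List.pyRange (max 0 (s - (h - 1))) (min s (w - 1) + 1) 1
def pvG (w s x : Int) : Int := (s - x) * w + x
-- the per-diagonal list A emits for sum s
def pvDiag (w h s : Int) : List Int :=
  (if PySem.Int.mod s 2 == 1 then (pvXs w h s).reverse else pvXs w h s).map (pvG w s)

-- A as a flatMap over the diagonal sums
theorem A_eq_flatMap (w h : Int) :
    snake_diagonal_scan_order w h
      = (PySem.List.pyRange 0 ((w - 1) + (h - 1) + 1) 1).flatMap (pvDiag w h) := by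
  unfold snake_diagonal_scan_order
  rw [PySem.List.foldl_congr_mem _ _
        (fun order s => order ++ pvDiag w h s) _
        (by intro acc s _
            simp only [pvDiag, pvXs, PySem.List.foldl_append_singleton_eq_map]
            rfl)]
  rw [PySem.List.foldl_append_eq_flatMap]
  simp

-- degenerate grids: A returns []
theorem A_nil_of_degenerate (w h : Int) (hwh : w ≤ 0 ∨ h ≤ 0) :
    snake_diagonal_scan_order w h = [] := by
  rw [A_eq_flatMap]
  apply List.flatMap_eq_nil_iff.mpr
  intro s _
  have : min s (w - 1) + 1 ≤ max 0 (s - (h - 1)) := by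
    rcases hwh with hw | hh
    · have : min s (w - 1) ≤ w - 1 := min_le_right _ _
      omega
    · have : min s (w - 1) ≤ s := min_le_left _ _
      omega
  simp [pvDiag, pvXs, PySem.List.pyRange_one_eq_nil this]

-- filter of a unit range by equality with a single value
theorem filter_pyRange_beq (a b c : Int) :
    (PySem.List.pyRange a b 1).filter (fun y => y == c)
      = if a ≤ c ∧ c < b then [c] else [] := by
  rw [List.filter_beq, List.Nodup.count (PySem.List.nodup_pyRange_one a b)]
  by_cases hc : a ≤ c ∧ c < b
  · simp [PySem.List.mem_pyRange_one, hc]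
  · simp [PySem.List.mem_pyRange_one, hc]

-- filter of a unit range by an interval condition is a unit range
theorem filter_pyRange_interval (a b lo hi : Int) :
    (PySem.List.pyRange a b 1).filter (fun x => decide (lo ≤ x ∧ x < hi))
      = PySem.List.pyRange (max a lo) (min b hi) 1 := by
  apply List.Perm.eq_of_pairwise (le := (· < ·))
      (fun x y _ _ h1 h2 => absurd h2 (not_lt_of_gt h1))
  · exact (PySem.List.pairwise_lt_pyRange_one a b).filter _
  · exact PySem.List.pairwise_lt_pyRange_one _ _
  · rw [List.perm_ext_iff_of_nodup
      ((PySem.List.nodup_pyRange_one a b).filter _) (PySem.List.nodup_pyRange_one _ _)]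
    intro x
    simp only [List.mem_filter, PySem.List.mem_pyRange_one, decide_eq_true_eq]
    omega

-- flatMap of an if-singleton is a map over a filter
theorem flatMap_ite_singleton {α β : Type} (l : List α) (p : α → Prop) [DecidablePred p]
    (g : α → β) :
    l.flatMap (fun x => if p x then [g x] else [])
      = (l.filter (fun x => decide (p x))).map g := by
  induction l with
  | nil => rfl
  | cons a t ih =>
    by_cases hp : p a <;> simp [List.flatMap_cons, hp, ih]

-- nested fold over two lists as a single fold over the product
theorem foldl_foldl_eq_foldl_flatMap {α β γ : Type} (xs : List α) (ys : List β)
    (step : γ → α → β → γ) (t : γ) :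
    xs.foldl (fun d x => ys.foldl (fun d y => step d x y) d) t
      = (xs.flatMap (fun x => ys.map (fun y => (x, y)))).foldl
          (fun d p => step d p.1 p.2) t := by
  induction xs generalizing t with
  | nil => rfl
  | cons a xs ih => simp [List.flatMap_cons, List.foldl_append, List.foldl_map, ih]

-- the group-by fold, pointwise
theorem foldl_modify_getElem? {α : Type} (L : List (Nat × α)) (t : List (List α)) (j : Nat) :
    (L.foldl (fun d p => d.modify p.1 (fun b => b ++ [p.2])) t)[j]?
      = t[j]?.map (fun b => b ++ (L.filter (fun p => p.1 == j)).map Prod.snd) := by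
  induction L generalizing t with
  | nil => simp
  | cons p L ih =>
    rw [List.foldl_cons, ih, List.getElem?_modify]
    by_cases hp : p.1 = j
    · cases t[j]? <;> simp [hp]
    · cases t[j]? <;> simp [hp]

-- the bucket of diagonal j equals A's per-diagonal x-scan (before the odd reverse)
theorem bucket_eq (w h : Int) (j : Nat) :
    (((PySem.List.pyRange 0 w 1).flatMap
        (fun x => (PySem.List.pyRange 0 h 1).map (fun y => ((x + y).toNat, y * w + x)))).filter
        (fun p => p.1 == j)).map Prod.snd
      = (pvXs w h (j : Int)).map (pvG w (j : Int)) := by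
  rw [List.filter_flatMap]
  have step : ∀ x ∈ PySem.List.pyRange 0 w 1,
      (((PySem.List.pyRange 0 h 1).map (fun y => ((x + y).toNat, y * w + x))).filter
          (fun p => p.1 == j)).map Prod.snd
        = if 0 ≤ (j : Int) - x ∧ (j : Int) - x < h then [pvG w (j : Int) x] else [] := by
    intro x hx
    rw [PySem.List.mem_pyRange_one] at hx
    rw [List.filter_map]
    have : ((PySem.List.pyRange 0 h 1).filter
          ((fun p => p.1 == j) ∘ (fun y => ((x + y).toNat, y * w + x))))
        = (PySem.List.pyRange 0 h 1).filter (fun y => y == (j : Int) - x) := by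
      apply List.filter_congr
      intro y hy
      rw [PySem.List.mem_pyRange_one] at hy
      show ((x + y).toNat == j) = (y == (j : Int) - x)
      rw [Bool.eq_iff_iff, beq_iff_eq, beq_iff_eq]
      omega
    rw [this, filter_pyRange_beq]
    by_cases hc : (0 : Int) ≤ (j : Int) - x ∧ (j : Int) - x < h
    · have : (0 : Int) ≤ (j : Int) - x ∧ (j : Int) - x < h := hc
      simp only [pvG]
      rw [if_pos (by omega), if_pos hc]
      simp
    · rw [if_neg (by omega), if_neg hc]
      simp
  calc ((PySem.List.pyRange 0 w 1).flatMap fun x =>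
          (((PySem.List.pyRange 0 h 1).map (fun y => ((x + y).toNat, y * w + x))).filter
            (fun p => p.1 == j))).map Prod.snd
      = (PySem.List.pyRange 0 w 1).flatMap (fun x =>
          (((PySem.List.pyRange 0 h 1).map (fun y => ((x + y).toNat, y * w + x))).filter
            (fun p => p.1 == j)).map Prod.snd) := by
        rw [List.map_flatMap]
    _ = (PySem.List.pyRange 0 w 1).flatMap (fun x =>
          if 0 ≤ (j : Int) - x ∧ (j : Int) - x < h then [pvG w (j : Int) x] else []) := by
        rw [List.flatMap_congr step]
    _ = ((PySem.List.pyRange 0 w 1).filter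
          (fun x => decide (0 ≤ (j : Int) - x ∧ (j : Int) - x < h))).map (pvG w (j : Int)) := by
        rw [flatMap_ite_singleton]
    _ = (pvXs w h (j : Int)).map (pvG w (j : Int)) := by
        have : ((PySem.List.pyRange 0 w 1).filter
            (fun x => decide (0 ≤ (j : Int) - x ∧ (j : Int) - x < h)))
            = pvXs w h (j : Int) := by
          have := filter_pyRange_interval 0 w ((j : Int) - (h - 1)) ((j : Int) + 1)
          rw [pvXs]
          rw [show ((PySem.List.pyRange 0 w 1).filter
              (fun x => decide (0 ≤ (j : Int) - x ∧ (j : Int) - x < h)))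
              = (PySem.List.pyRange 0 w 1).filter
              (fun x => decide ((j : Int) - (h - 1) ≤ x ∧ x < (j : Int) + 1)) from
            List.filter_congr (fun x _ => by simp only [decide_eq_decide]; omega)]
          rw [this]
          congr 1
          omega
        rw [this]

-- the diagonals table B builds, in closed form
theorem diagonals_eq (w h : Int) :
    ((PySem.List.pyRange 0 w 1).foldl (fun d x =>
        (PySem.List.pyRange 0 h 1).foldl (fun d y =>
          d.modify (x + y).toNat (fun b => b ++ [y * w + x])) d)
        (List.replicate (w + h - 1).toNat ([] : List Int)))
      = (PySem.List.pyRange 0 (w + h - 1) 1).map (fun s => (pvXs w h s).map (pvG w s)) := by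
  rw [foldl_foldl_eq_foldl_flatMap]
  have hfold :
      (((PySem.List.pyRange 0 w 1).flatMap (fun x =>
          (PySem.List.pyRange 0 h 1).map (fun y => (x, y)))).foldl
        (fun d p => d.modify (p.1 + p.2).toNat (fun b => b ++ [p.2 * w + p.1]))
        (List.replicate (w + h - 1).toNat ([] : List Int)))
      = ((((PySem.List.pyRange 0 w 1).flatMap (fun x =>
          (PySem.List.pyRange 0 h 1).map (fun y => (x, y)))).map
            (fun p => ((p.1 + p.2).toNat, p.2 * w + p.1))).foldl
          (fun d p => d.modify p.1 (fun b => b ++ [p.2]))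
          (List.replicate (w + h - 1).toNat ([] : List Int))) := by
    rw [List.foldl_map]
  rw [hfold]
  apply List.ext_getElem?
  intro j
  rw [foldl_modify_getElem?]
  by_cases hj : j < (w + h - 1).toNat
  · rw [List.getElem?_eq_getElem (by simpa using hj),
        List.getElem?_eq_getElem (by
          simpa [PySem.List.length_pyRange_one] using hj)]
    simp only [List.getElem_replicate, Option.map_some, List.nil_append, Option.some.injEq,
      List.getElem_map, PySem.List.getElem_pyRange_one, zero_add]
    rw [← bucket_eq w h j]
    simp only [List.map_flatMap, List.map_map, Function.comp_def]
  · rw [List.getElem?_eq_none (by simpa using Nat.le_of_not_lt hj),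
        List.getElem?_eq_none (by
          simpa [PySem.List.length_pyRange_one] using Nat.le_of_not_lt hj)]
    simp

-- main positive case
theorem pos_case (w h : Int) (hw : 0 < w) (hh : 0 < h) :
    snake_diagonal_scan_order w h = snake_diagonal_scan_order_alt w h := by
  rw [A_eq_flatMap]
  unfold snake_diagonal_scan_order_alt
  rw [if_neg (by omega)]
  simp only
  rw [diagonals_eq w h]
  rw [PySem.List.enumerate_eq_map_pyRange _ ([] : List Int)]
  have hlen : PySem.List.len ((PySem.List.pyRange 0 (w + h - 1) 1).map
      (fun s => (pvXs w h s).map (pvG w s))) = w + h - 1 := by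
    simp [PySem.List.len, PySem.List.length_pyRange_one]
    omega
  rw [hlen, List.foldl_map]
  rw [PySem.List.foldl_congr_mem _ _
        (fun order s => order ++ pvDiag w h s) _ ?_]
  · rw [PySem.List.foldl_append_eq_flatMap]
    have : (w - 1) + (h - 1) + 1 = w + h - 1 := by ring
    rw [this, List.nil_append]
  · intro acc s hsmem
    rw [PySem.List.mem_pyRange_one] at hsmem
    have hget : PySem.List.pyGetD ((PySem.List.pyRange 0 (w + h - 1) 1).map
        (fun t => (pvXs w h t).map (pvG w t))) s ([] : List Int)
        = (pvXs w h s).map (pvG w s) :=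
      PySem.List.pyGetD_map_pyRange_of_nonneg _ _ _ _ hsmem.1 hsmem.2
    simp only [hget, pvDiag]
    congr 1
    by_cases hodd : s % 2 = 1
    · simp [hodd, List.map_reverse]
    · simp [hodd]

-- ===== VERDICT (by name: the statement is the Claim_ definition above) =====
theorem snake_diagonal_scan_order_spec : Claim_equal_snake_diagonal_scan_order := by
  intro w h _
  unfold Spec_snake_diagonal_scan_order
  by_cases hw : 0 < w
  · by_cases hh : 0 < h
    · exact pos_case w h hw hh
    · rw [A_nil_of_degenerate w h (Or.inr (by omega))]
      unfold snake_diagonal_scan_order_alt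
      rw [if_pos (Or.inr (by omega))]
  · rw [A_nil_of_degenerate w h (Or.inl (by omega))]
    unfold snake_diagonal_scan_order_alt
    rw [if_pos (Or.inl (by omega))]
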